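-- pv_equiv track=rewrite | github.com/ArinaArtiukevich/algorithms_practice | basic/firist_project/class/1_1_linear_search/two_passes/5_shortest_words.py | get_shortest_words_custom
-- ===== SOURCE A (Python) =====
-- def get_shortest_words_custom(seq: list[str]) -> str:
--     result = ''
--     if len(seq) == 0:
--         result = None
--     else:
--         min_len = len(seq[0])
--         for i in range(1, len(seq)):
--             if len(seq[i]) < min_len:
--                 min_len = len(seq[i])
--         for i in range(len(seq)):
--             if len(seq[i]) == min_len:
--                 result += seq[i] + ' '
--     return result
-- ===== SOURCE B (Python) =====
-- def get_shortest_words_custom(seq: list[str]) -> str: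
--     if len(seq) == 0:
--         return None
--     min_len = None
--     result = ''
--     for word in seq:
--         if min_len is None or len(word) < min_len:
--             min_len = len(word)
--             result = word + ' '
--         elif len(word) == min_len:
--             result += word + ' '
--     return result
-- ===== Notes on version B (the rewrite author's own statement) =====
-- stated objective: alternative
-- what changed: Replaced A's two passes (first compute the minimum length, then rescan collecting matching words) by a single pass that tracks the running minimum and resets the accumulated result whenever a strictly shorter word appears.
-- outside the precondition, e.g. on get_shortest_words_custom([]): A returns None, B returns None
import Mathlib
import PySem

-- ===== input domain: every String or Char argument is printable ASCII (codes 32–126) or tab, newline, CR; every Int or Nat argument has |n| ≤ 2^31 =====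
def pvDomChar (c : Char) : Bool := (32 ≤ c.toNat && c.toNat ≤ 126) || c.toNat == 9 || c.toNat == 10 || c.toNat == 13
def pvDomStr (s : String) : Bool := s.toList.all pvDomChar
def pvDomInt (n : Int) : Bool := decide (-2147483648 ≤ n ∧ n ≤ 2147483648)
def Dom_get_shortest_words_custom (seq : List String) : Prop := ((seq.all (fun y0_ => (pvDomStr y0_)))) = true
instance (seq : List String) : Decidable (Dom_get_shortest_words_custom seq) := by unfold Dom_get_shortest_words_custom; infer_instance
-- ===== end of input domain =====

-- B merges A's two passes (min length, then collect) into one pass that resets the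
-- accumulated result whenever a strictly shorter word appears; same O(n) cost, different decomposition.

-- ===== PORT A =====
-- A's first loop: min_len over indices 1..n-1, seeded with len(seq[0])
def aMinLen (seq : List String) : Int :=
  (PySem.List.pyRange 1 (seq.length : Int) 1).foldl
    (fun m i =>
      if PySem.Str.len (PySem.List.pyGetD seq i "") < m then
        PySem.Str.len (PySem.List.pyGetD seq i "")
      else m)
    (PySem.Str.len (PySem.List.pyGetD seq 0 ""))

-- A's second loop: append every word whose length equals min_len
def aCollect (seq : List String) (min_len : Int) : String :=
  (PySem.List.pyRange 0 (seq.length : Int) 1).foldl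
    (fun r i =>
      if PySem.Str.len (PySem.List.pyGetD seq i "") = min_len then
        r ++ (PySem.List.pyGetD seq i "" ++ " ")
      else r)
    ""

-- on [] Python A returns None, which is not a str (excluded by Pre_); the port returns "" there
def get_shortest_words_custom (seq : List String) : String :=
  if (seq.length : Int) = 0 then ""
  else aCollect seq (aMinLen seq)

-- ===== PORT B =====
-- one step of B's single pass: state = (current min length or none, accumulated result)
def bStep (st : Option Int × String) (w : String) : Option Int × String :=
  match st with
  | (none, _) => (some (PySem.Str.len w), w ++ " ")
  | (some m, r) =>
    if PySem.Str.len w < m then (some (PySem.Str.len w), w ++ " ")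
    else if PySem.Str.len w = m then (some m, r ++ (w ++ " "))
    else (some m, r)

-- on [] Python B returns None, which is not a str (excluded by Pre_); the port returns "" there
def get_shortest_words_custom_alt (seq : List String) : String :=
  if (seq.length : Int) = 0 then ""
  else (seq.foldl bStep (none, "")).2

-- ===== PRECONDITION & SPEC =====
-- Pre_ excludes only the empty list, on which both Pythons return None, which is not a value of type str.
def Pre_get_shortest_words_custom (seq : List String) : Prop := seq ≠ []
instance (seq : List String) : Decidable (Pre_get_shortest_words_custom seq) := by
  unfold Pre_get_shortest_words_custom; infer_instance
def pvWitness_get_shortest_words_custom : List String := ["ab", "c", "de", "f"]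

def Spec_get_shortest_words_custom (seq : List String) (out : String) : Prop := out = get_shortest_words_custom_alt seq
instance (seq : List String) (out : String) : Decidable (Spec_get_shortest_words_custom seq out) := by unfold Spec_get_shortest_words_custom; infer_instance

-- ===== CLAIM (what is proved, stated in full; the proofs are below) =====
def Claim_equal_get_shortest_words_custom : Prop := ∀ (seq : List String), Dom_get_shortest_words_custom seq → Pre_get_shortest_words_custom seq → Spec_get_shortest_words_custom seq (get_shortest_words_custom seq)

-- ===== LEMMAS AND PROOFS =====

-- the running minimum, as a plain list fold
def minAcc (m : Int) (ws : List String) : Int :=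
  ws.foldl (fun a w => if PySem.Str.len w < a then PySem.Str.len w else a) m

-- A's second loop as a plain list fold, from an arbitrary accumulator
def collect (k : Int) (r : String) (ws : List String) : String :=
  ws.foldl (fun r x => if PySem.Str.len x = k then r ++ (x ++ " ") else r) r

theorem minAcc_cons (m : Int) (w : String) (ws : List String) :
    minAcc m (w :: ws) = minAcc (if PySem.Str.len w < m then PySem.Str.len w else m) ws := rfl

theorem collect_cons (k : Int) (r : String) (w : String) (ws : List String) :
    collect k r (w :: ws) = collect k (if PySem.Str.len w = k then r ++ (w ++ " ") else r) ws := rfl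

theorem minAcc_le (ws : List String) : ∀ m : Int, minAcc m ws ≤ m := by
  induction ws with
  | nil => intro m; simp [minAcc]
  | cons w ws ih =>
    intro m
    rw [minAcc_cons]
    split_ifs with h
    · exact le_trans (ih _) (le_of_lt h)
    · exact ih m

theorem collect_factor (ws : List String) : ∀ (k : Int) (r : String),
    collect k r ws = r ++ collect k "" ws := by
  induction ws with
  | nil => intro k r; simp [collect]
  | cons w ws ih =>
    intro k r
    rw [collect_cons, collect_cons k "", ih, ih k (if PySem.Str.len w = k then "" ++ (w ++ " ") else "")]
    split_ifs with h <;> simp [String.append_assoc]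

-- invariant of B's single pass
theorem bFold_spec (ws : List String) : ∀ (m : Int) (r : String),
    (ws.foldl bStep (some m, r)).2 =
      if minAcc m ws < m then collect (minAcc m ws) "" ws
      else r ++ collect m "" ws := by
  induction ws with
  | nil =>
    intro m r
    simp [minAcc, collect]
  | cons w ws ih =>
    intro m r
    have hle := minAcc_le ws
    rw [List.foldl_cons, minAcc_cons, collect_cons, collect_cons]
    by_cases h1 : PySem.Str.len w < m
    · have hb : bStep (some m, r) w = (some (PySem.Str.len w), w ++ " ") := by
        simp only [bStep]; rw [if_pos h1]
      rw [hb, ih, if_pos h1]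
      have hmin : minAcc (PySem.Str.len w) ws < m := lt_of_le_of_lt (hle _) h1
      rw [if_pos hmin]
      by_cases h2 : minAcc (PySem.Str.len w) ws < PySem.Str.len w
      · rw [if_pos h2, if_neg (by omega : ¬ PySem.Str.len w = minAcc (PySem.Str.len w) ws)]
      · have heq : minAcc (PySem.Str.len w) ws = PySem.Str.len w := by
          have := hle (PySem.Str.len w); omega
        rw [if_neg h2, heq, if_pos rfl, collect_factor ws (PySem.Str.len w) ("" ++ (w ++ " ")),
          String.empty_append]
    · rw [if_neg h1]
      by_cases h2 : PySem.Str.len w = m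
      · have hb : bStep (some m, r) w = (some m, r ++ (w ++ " ")) := by
          simp only [bStep]; rw [if_neg h1, if_pos h2]
        rw [hb, ih, if_pos h2]
        by_cases h3 : minAcc m ws < m
        · rw [if_pos h3, if_pos h3, if_neg (by omega : ¬ PySem.Str.len w = minAcc m ws)]
        · rw [if_neg h3, if_neg h3, collect_factor ws m ("" ++ (w ++ " ")),
            String.empty_append, String.append_assoc]
      · have hb : bStep (some m, r) w = (some m, r) := by
          simp only [bStep]; rw [if_neg h1, if_neg h2]
        rw [hb, ih, if_neg h2]
        by_cases h3 : minAcc m ws < m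
        · rw [if_pos h3, if_pos h3,
            if_neg (by have := hle m; omega : ¬ PySem.Str.len w = minAcc m ws)]
        · rw [if_neg h3, if_neg h3]

theorem aMinLen_cons (w : String) (ws : List String) :
    aMinLen (w :: ws) = minAcc (PySem.Str.len w) ws := by
  unfold aMinLen
  refine ((PySem.List.foldl_pyRange_pyGetD' (w :: ws) ""
    (fun m x => if PySem.Str.len x < m then PySem.Str.len x else m)
    (PySem.Str.len (PySem.List.pyGetD (w :: ws) 0 "")) (by norm_num : (0:Int) ≤ 1)).trans ?_)
  rw [PySem.List.pyGetD_zero_cons]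
  rfl

theorem aCollect_eq (seq : List String) (k : Int) :
    aCollect seq k = collect k "" seq := by
  unfold aCollect
  exact PySem.List.foldl_pyRange_zero_pyGetD' seq ""
    (fun r x => if PySem.Str.len x = k then r ++ (x ++ " ") else r) ""

-- ===== VERDICT (by name: the statement is the Claim_ definition above) =====
theorem get_shortest_words_custom_spec : Claim_equal_get_shortest_words_custom := by
  intro seq _hdom hpre
  unfold Spec_get_shortest_words_custom
  obtain ⟨w, ws, rfl⟩ : ∃ w ws, seq = w :: ws := by
    cases seq with
    | nil => exact absurd rfl hpre
    | cons w ws => exact ⟨w, ws, rfl⟩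
  have hlen : ¬ ((w :: ws).length : Int) = 0 := by
    simp only [List.length_cons]; push_cast; omega
  unfold get_shortest_words_custom get_shortest_words_custom_alt
  rw [if_neg hlen, if_neg hlen, aMinLen_cons, aCollect_eq, List.foldl_cons]
  rw [show (bStep (none, "") w) = (some (PySem.Str.len w), w ++ " ") from rfl]
  rw [bFold_spec ws (PySem.Str.len w) (w ++ " "), collect_cons]
  have hle := minAcc_le ws (PySem.Str.len w)
  by_cases h : minAcc (PySem.Str.len w) ws < PySem.Str.len w
  · rw [if_pos h, if_neg (by omega : ¬ PySem.Str.len w = minAcc (PySem.Str.len w) ws)]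
  · have heq : minAcc (PySem.Str.len w) ws = PySem.Str.len w := by omega
    rw [if_neg h, heq, if_pos rfl, collect_factor, String.empty_append]
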